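-- pv_equiv track=rewrite | github.com/MinMolang/codePractice | algospot/NAMING.py | getPrefixSuffix
-- ===== SOURCE A (Python) =====
-- def getPartialMatch(N):
--     m = len(N)
--
--     # KMP로 자기 자신 찾기
--     # N을 N에서 찾는다 begin = 0 이면 자기 자신을 찾아버리니까 안된다
--     begin, matched = 1, 0
--     pi = [0] * m
--     # 비교할 문자가 N의 끝에 도달할 때까지 찾으면서 부분일치 모두 기록
--     while (begin + matched < m):
--         # begin + matched에 있는 문자와 matched에 있는 문자 일치하는 경우
--         if N[begin + matched] == N[matched]:
--             matched += 1
--             #pi : 실패함수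
--             pi[begin + matched -1] = matched
--
--         # 일치하지 않고
--         else:
--             # matched 가 0 인경우 begin 을 한칸 앞으로
--             if matched == 0:
--                 begin +=1
--             else:
--                 # begin을  matched - 일치하는 접미사/ 접두사의 길이 만큼 더한다
--                 begin += matched - pi[matched - 1]
--                 matched = pi[matched - 1]
--
--     return pi
--
-- def getPrefixSuffix(s):
--     pi = getPartialMatch(s)
--     k = len(s)
--     result = []
--
--     while k > 0 :
--
--         #s[..k-1]는 답
--         result.append(k)
--         #s[..k-1]의 접미사도 되고 접두사도 되는 문자열도 답이다
--         k = pi[k-1]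
--     return result
-- ===== SOURCE B (Python) =====
-- def getPrefixSuffix(s):
--     n = len(s)
--     return [k for k in range(n, 0, -1) if s[:k] == s[n - k:]]
-- ===== Notes on version B (the rewrite author's own statement) =====
-- stated objective: simpler
-- what changed: B drops the KMP failure-function construction and border-chain walk entirely and instead tests every length k from n down to 1 for prefix==suffix by direct slice comparison in one comprehension.
import Mathlib
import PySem

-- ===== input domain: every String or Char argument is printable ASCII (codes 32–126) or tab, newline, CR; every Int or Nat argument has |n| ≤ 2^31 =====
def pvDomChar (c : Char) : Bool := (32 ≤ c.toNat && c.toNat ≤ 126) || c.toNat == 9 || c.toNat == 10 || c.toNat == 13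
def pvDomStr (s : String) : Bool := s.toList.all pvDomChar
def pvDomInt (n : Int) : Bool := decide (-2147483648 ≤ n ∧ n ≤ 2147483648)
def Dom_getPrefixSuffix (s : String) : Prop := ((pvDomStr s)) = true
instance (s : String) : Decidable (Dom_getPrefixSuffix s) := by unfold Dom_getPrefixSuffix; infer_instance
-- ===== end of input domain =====

-- B replaces A's KMP failure-function + border-chain walk by a direct prefix==suffix scan over
-- all lengths (simpler, not faster: O(n^2) vs A's O(n)).

-- ===== PORT A =====
-- The while-loop of getPartialMatch, state (begin, matched, pi), fuel-bounded.
-- Fuel 3*len(N) always suffices (the measure 2*begin+matched grows each iteration; proved below),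
-- so the fuel guard only makes the same computation total. Every index is in range when read
-- (begin+matched < m and matched ≤ begin+matched), so List.getD is exact there.
def kmpLoop (l : List Char) : Nat → Nat → Nat → List Nat → List Nat
  | 0, _, _, piv => piv
  | fuel + 1, b, t, piv =>
    if b + t < l.length then
      if l.getD (b + t) ' ' = l.getD t ' ' then
        kmpLoop l fuel b (t + 1) (piv.set (b + t) (t + 1))
      else if t = 0 then
        kmpLoop l fuel (b + 1) 0 piv
      else
        kmpLoop l fuel (b + (t - piv.getD (t - 1) 0)) (piv.getD (t - 1) 0) piv
    else piv

-- The while-loop of getPrefixSuffix: result.append(k); k = pi[k-1]. Fuel len(s)+1 always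
-- suffices (k strictly decreases; proved below).
def chainLoop (piv : List Nat) : Nat → Nat → List Int
  | 0, _ => []
  | fuel + 1, k => if 0 < k then (k : Int) :: chainLoop piv fuel (piv.getD (k - 1) 0) else []

def getPrefixSuffix (s : String) : List Int :=
  let l := s.toList
  let m := l.length
  let piv := kmpLoop l (3 * m) 1 0 (List.replicate m 0)
  chainLoop piv (m + 1) m

-- ===== PORT B =====
-- [k for k in range(n, 0, -1) if s[:k] == s[n-k:]]  (string slices compared via their char lists)
def getPrefixSuffix_alt (s : String) : List Int :=
  let l := s.toList
  let n : Int := l.length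
  (PySem.List.pyRange n 0 (-1)).filter
    (fun k => PySem.List.slice l none (some k) == PySem.List.slice l (some (n - k)) none)

-- ===== PRECONDITION & SPEC =====
def Spec_getPrefixSuffix (s : String) (out : List Int) : Prop := out = getPrefixSuffix_alt s
instance (s : String) (out : List Int) : Decidable (Spec_getPrefixSuffix s out) := by unfold Spec_getPrefixSuffix; infer_instance

-- ===== CLAIM (what is proved, stated in full; the proofs are below) =====
def Claim_equal_getPrefixSuffix : Prop := ∀ (s : String), Dom_getPrefixSuffix s → Spec_getPrefixSuffix s (getPrefixSuffix s)

-- ===== LEMMAS AND PROOFS =====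

-- "k is a border length of the prefix of length n of l" (pointwise form, Bool-valued).
def bdB (l : List Char) (n k : Nat) : Bool :=
  decide (k ≤ n) && decide (∀ i, i < k → l.getD (n - k + i) ' ' = l.getD i ' ')

def Bd (l : List Char) (n k : Nat) : Prop := bdB l n k = true

lemma bd_iff (l : List Char) (n k : Nat) :
    Bd l n k ↔ k ≤ n ∧ ∀ i, i < k → l.getD (n - k + i) ' ' = l.getD i ' ' := by
  simp [Bd, bdB]

-- longest proper border of the prefix of length n
def mb (l : List Char) (n : Nat) : Nat := Nat.findGreatest (fun k => bdB l n k = true) (n - 1)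

lemma bd_zero (l : List Char) (n : Nat) : Bd l n 0 := by
  rw [bd_iff]; exact ⟨Nat.zero_le _, fun i hi => absurd hi (Nat.not_lt_zero i)⟩

lemma bd_refl (l : List Char) (n : Nat) : Bd l n n := by
  rw [bd_iff]; exact ⟨le_rfl, fun i hi => by simp⟩

lemma bd_trans (l : List Char) {k n N : Nat} (h1 : Bd l n k) (h2 : Bd l N n) : Bd l N k := by
  
  rw [bd_iff] at *
  obtain ⟨hkn, hk⟩ := h1; obtain ⟨hnN, hn⟩ := h2
  refine ⟨le_trans hkn hnN, fun i hi => ?_⟩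
  have e1 : N - k + i = N - n + (n - k + i) := by omega
  rw [e1, hn _ (by omega), hk _ hi]

lemma bd_anti (l : List Char) {k n N : Nat} (h1 : Bd l N k) (h2 : Bd l N n) (hkn : k ≤ n) :
    Bd l n k := by
  
  rw [bd_iff] at *
  obtain ⟨hkN, hk⟩ := h1; obtain ⟨hnN, hn⟩ := h2
  refine ⟨hkn, fun i hi => ?_⟩
  have e1 : N - n + (n - k + i) = N - k + i := by omega
  calc l.getD (n - k + i) ' ' = l.getD (N - n + (n - k + i)) ' ' := (hn _ (by omega)).symm
    _ = l.getD (N - k + i) ' ' := by rw [e1]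
    _ = l.getD i ' ' := hk _ hi

lemma mb_lt (l : List Char) {n : Nat} (hn : 1 ≤ n) : mb l n < n := by
  have := Nat.findGreatest_le (P := fun k => bdB l n k = true) (n - 1)
  unfold mb; omega

lemma mb_bd (l : List Char) (n : Nat) : Bd l n (mb l n) :=
  Nat.findGreatest_spec (Nat.zero_le _) (bd_zero l n)

lemma mb_max (l : List Char) {n k : Nat} (h : Bd l n k) (hk : k < n) : k ≤ mb l n :=
  Nat.le_findGreatest (by omega) h

-- loop invariant of the KMP self-match
def KInv (l : List Char) (b t : Nat) (piv : List Nat) : Prop :=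
  1 ≤ b ∧ b + t ≤ l.length ∧ piv.length = l.length ∧
  (∀ i, i < t → l.getD (b + i) ' ' = l.getD i ' ') ∧
  (∀ j, j < b + t → piv.getD j 0 = mb l (j + 1)) ∧
  (∀ j, b + t ≤ j → j < l.length → piv.getD j 0 = 0) ∧
  (∀ c, 1 ≤ c → c < b → ∃ i, c + i ≤ b + t ∧ c + i < l.length ∧
      l.getD (c + i) ' ' ≠ l.getD i ' ')

lemma kmp_inv (l : List Char) :
    ∀ fuel b t piv, KInv l b t piv → 3 * l.length < 2 * b + t + fuel →
      ∀ j, j < l.length → (kmpLoop l fuel b t piv).getD j 0 = mb l (j + 1) := by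
  intro fuel
  induction fuel with
  | zero =>
    intro b t piv hinv hfuel j hj
    obtain ⟨hb, hbt, -, -, -, -, -⟩ := hinv
    omega
  | succ fuel ih =>
    intro b t piv hinv hfuel j hj
    obtain ⟨hb, hbt, hlen, hA, hB, hD, hC⟩ := hinv
    simp only [kmpLoop]
    by_cases hcond : b + t < l.length
    · rw [if_pos hcond]
      by_cases hmatch : l.getD (b + t) ' ' = l.getD t ' '
      · rw [if_pos hmatch]
        have hsetlen : (piv.set (b + t) (t + 1)).length = l.length := by simp [hlen]
        have hgetset_eq : (piv.set (b + t) (t + 1)).getD (b + t) 0 = t + 1 := by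
          rw [List.getD_eq_getElem _ _ (by omega : b + t < (piv.set (b + t) (t + 1)).length)]
          exact List.getElem_set_self _
        have hgetset_ne : ∀ j', j' ≠ b + t →
            (piv.set (b + t) (t + 1)).getD j' 0 = piv.getD j' 0 := by
          intro j' hne
          by_cases hj' : j' < piv.length
          · rw [List.getD_eq_getElem _ _ (by simpa using hj'), List.getD_eq_getElem _ _ hj']
            exact List.getElem_set_ne (by omega : b + t ≠ j') _
          · rw [List.getD_eq_default _ _ (by simp; omega), List.getD_eq_default _ _ (by omega)]
        have hBd_new : Bd l (b + t + 1) (t + 1) := by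
          rw [bd_iff]
          refine ⟨by omega, fun i hi => ?_⟩
          have e : b + t + 1 - (t + 1) + i = b + i := by omega
          rw [e]
          rcases Nat.lt_or_ge i t with h | h
          · exact hA i h
          · have he : i = t := by omega
            subst he; exact hmatch
        have hmb_new : mb l (b + t + 1) = t + 1 := by
          apply le_antisymm
          · by_contra hgt
            push Not at hgt
            have hwlt : mb l (b + t + 1) < b + t + 1 := mb_lt l (by omega)
            have hwbd := mb_bd l (b + t + 1)
            rw [bd_iff] at hwbd
            obtain ⟨-, hwpt⟩ := hwbd
            obtain ⟨i, hi1, hi2, hi3⟩ := hC (b + t + 1 - mb l (b + t + 1)) (by omega) (by omega)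
            apply hi3
            have hpt := hwpt i (by omega)
            have e : b + t + 1 - mb l (b + t + 1) + i = b + t + 1 - mb l (b + t + 1) + i := rfl
            exact hpt
          · exact mb_max l hBd_new (by omega)
        apply ih b (t + 1) (piv.set (b + t) (t + 1)) ?_ (by omega) j hj
        refine ⟨hb, by omega, hsetlen, ?_, ?_, ?_, ?_⟩
        · intro i hi
          rcases Nat.lt_or_ge i t with h | h
          · exact hA i h
          · have he : i = t := by omega
            subst he; exact hmatch
        · intro j' hj'
          rcases Nat.lt_or_ge j' (b + t) with h | h
          · rw [hgetset_ne j' (by omega)]; exact hB j' h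
          · have he : j' = b + t := by omega
            subst he; rw [hgetset_eq, hmb_new]
        · intro j' hj1 hj2
          rw [hgetset_ne j' (by omega)]; exact hD j' (by omega) hj2
        · intro c hc1 hc2
          obtain ⟨i, h1, h2, h3⟩ := hC c hc1 hc2
          exact ⟨i, by omega, h2, h3⟩
      · rw [if_neg hmatch]
        by_cases ht : t = 0
        · rw [if_pos ht]
          subst ht
          have hmb0 : mb l (b + 1) = 0 := by
            by_contra hne
            have hpos : 1 ≤ mb l (b + 1) := Nat.one_le_iff_ne_zero.mpr hne
            have hwlt : mb l (b + 1) < b + 1 := mb_lt l (by omega)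
            have hwbd := mb_bd l (b + 1)
            rw [bd_iff] at hwbd
            obtain ⟨-, hwpt⟩ := hwbd
            rcases Nat.lt_or_ge (b + 1 - mb l (b + 1)) b with hcb | hcb
            · obtain ⟨i, h1, h2, h3⟩ := hC (b + 1 - mb l (b + 1)) (by omega) hcb
              exact h3 (hwpt i (by omega))
            · have hwb : mb l (b + 1) = 1 := by omega
              have hpt := hwpt 0 (by omega)
              rw [hwb] at hpt
              have e : b + 1 - 1 + 0 = b + 0 := by omega
              rw [e] at hpt
              exact hmatch (by simpa using hpt)
          apply ih (b + 1) 0 piv ?_ (by omega) j hj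
          refine ⟨by omega, by omega, hlen, ?_, ?_, ?_, ?_⟩
          · intro i hi; exact absurd hi (by omega)
          · intro j' hj'
            rcases Nat.lt_or_ge j' b with h | h
            · exact hB j' (by omega)
            · have he : j' = b := by omega
              subst he
              rw [hD j' (by omega) (by omega)]
              exact hmb0.symm
          · intro j' h1 h2; exact hD j' (by omega) h2
          · intro c h1 h2
            rcases Nat.lt_or_ge c b with h | h
            · obtain ⟨i, ha, hb', hcne⟩ := hC c h1 h
              exact ⟨i, by omega, hb', hcne⟩
            · have he : c = b := by omega
              subst he
              exact ⟨0, by omega, by omega, hmatch⟩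
        · rw [if_neg ht]
          have hp : piv.getD (t - 1) 0 = mb l (t - 1 + 1) := hB (t - 1) (by omega)
          have e1 : t - 1 + 1 = t := by omega
          rw [e1] at hp
          have hplt : mb l t < t := mb_lt l (by omega)
          have hpbd := mb_bd l t
          rw [hp]
          apply ih (b + (t - mb l t)) (mb l t) piv ?_ (by omega) j hj
          refine ⟨by omega, by omega, hlen, ?_, ?_, ?_, ?_⟩
          · intro i hi
            rw [bd_iff] at hpbd
            obtain ⟨-, hppt⟩ := hpbd
            have h1 := hppt i hi
            have h2 := hA (t - mb l t + i) (by omega)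
            have e : b + (t - mb l t) + i = b + (t - mb l t + i) := by omega
            rw [e]
            exact h2.trans h1
          · intro j' hj'
            exact hB j' (by omega)
          · intro j' h1 h2
            exact hD j' (by omega) h2
          · intro c hc1 hc2
            rcases Nat.lt_or_ge c b with h | h
            · obtain ⟨i, h1, h2, h3⟩ := hC c hc1 h
              exact ⟨i, by omega, h2, h3⟩
            · rcases Nat.eq_or_lt_of_le h with he | hlt2
              · subst he
                exact ⟨t, by omega, by omega, hmatch⟩
              · by_contra hnone
                push Not at hnone
                have hbdw : Bd l t (t - (c - b)) := by
                  rw [bd_iff]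
                  refine ⟨by omega, fun i hi => ?_⟩
                  have e : t - (t - (c - b)) + i = c - b + i := by omega
                  rw [e]
                  have h2 := hA (c - b + i) (by omega)
                  have h3 := hnone i (by omega) (by omega)
                  have e2 : b + (c - b + i) = c + i := by omega
                  rw [e2] at h2
                  exact h2.symm.trans h3
                have hle := mb_max l hbdw (by omega)
                omega
    · rw [if_neg hcond]
      exact hB j (by omega)

lemma kmp_correct (l : List Char) (hm : 1 ≤ l.length) :
    ∀ j, j < l.length →
      (kmpLoop l (3 * l.length) 1 0 (List.replicate l.length 0)).getD j 0 = mb l (j + 1) := by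
  apply kmp_inv l (3 * l.length) 1 0 _ ?_ (by omega)
  refine ⟨le_rfl, by omega, by simp, ?_, ?_, ?_, ?_⟩
  · intro i hi; exact absurd hi (by omega)
  · intro j hj
    have he : j = 0 := by omega
    subst he
    rw [List.getD_replicate _ (by omega)]
    unfold mb
    simp [Nat.findGreatest]
  · intro j h1 h2
    exact List.getD_replicate _ h2
  · intro c h1 h2; exact absurd h2 (by omega)

def desc : Nat → List Nat
  | 0 => []
  | k + 1 => (k + 1) :: desc k

lemma mem_desc {w : Nat} : ∀ {k : Nat}, w ∈ desc k ↔ 1 ≤ w ∧ w ≤ k := by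
  
  intro k
  induction k with
  | zero => simp [desc]; omega
  | succ k ih => simp [desc, ih]; omega

lemma desc_filter_skip (l : List Char) (m k : Nat) (hk : Bd l m k) (_hkm : k ≤ m) :
    ∀ j, j < k → mb l k ≤ j →
      (desc j).filter (fun w => bdB l m w) = (desc (mb l k)).filter (fun w => bdB l m w) := by
  intro j
  induction j with
  | zero =>
    intro h0 hmb0
    have he : mb l k = 0 := by omega
    rw [he]
  | succ j ih =>
    intro hjk hmb
    rcases Nat.lt_or_ge j (mb l k) with h | h
    · have he : mb l k = j + 1 := by omega
      rw [he]
    · have hne : bdB l m (j + 1) = false := by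
        rw [Bool.eq_false_iff]
        intro hbd
        have hkj : Bd l k (j + 1) := bd_anti l hbd hk (by omega)
        have := mb_max l hkj (by omega)
        omega
      simp only [desc, List.filter_cons, hne]
      simp only [Bool.false_eq_true, if_false]
      exact ih (by omega) h

lemma chain_eq (l : List Char) (piv : List Nat)
    (hpi : ∀ j, j < l.length → piv.getD j 0 = mb l (j + 1)) :
    ∀ fuel k, k < fuel → k ≤ l.length → Bd l l.length k →
      chainLoop piv fuel k =
        ((desc k).filter (fun w => bdB l l.length w)).map (fun w : Nat => (w : Int)) := by
  intro fuel
  induction fuel with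
  | zero => intro k hk; omega
  | succ fuel ih =>
    intro k hk hkm hbd
    match k with
    | 0 => simp [chainLoop, desc]
    | Nat.succ k =>
      have hp : piv.getD k 0 = mb l (k + 1) := hpi k (by omega)
      have hlt := mb_lt l (show 1 ≤ k + 1 by omega)
      have hbd' : Bd l l.length (mb l (k + 1)) := bd_trans l (mb_bd l (k + 1)) hbd
      have ihr := ih (mb l (k + 1)) (by omega) (by omega) hbd'
      simp only [chainLoop, if_pos (Nat.succ_pos k)]
      have e : k + 1 - 1 = k := by omega
      rw [e, hp, ihr]
      simp only [desc, List.filter_cons, show bdB l l.length (k + 1) = true from hbd]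
      rw [desc_filter_skip l l.length (k + 1) hbd hkm k (by omega) (by omega)]
      simp

lemma pyRange_desc : ∀ k : Nat, PySem.List.pyRange (k : Int) 0 (-1) = (desc k).map (fun w : Nat => (w : Int)) := by
  intro k
  induction k with
  | zero => simp [desc, PySem.List.pyRange_neg_one_eq_nil]
  | succ k ih =>
    have e1 : ((k + 1 : Nat) : Int) - 1 = (k : Int) := by push_cast; ring
    rw [PySem.List.pyRange_neg_one_cons (by exact_mod_cast Nat.succ_pos k), e1, ih]
    simp [desc]

lemma filter_map_cast (cond : Int → Bool) (P : Nat → Bool) :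
    ∀ ns : List Nat, (∀ w ∈ ns, cond (w : Int) = P w) →
      (ns.map (fun w : Nat => (w : Int))).filter cond = (ns.filter P).map (fun w : Nat => (w : Int)) := by
  
  intro ns
  induction ns with
  | nil => simp
  | cons a tl ih =>
    intro h
    have ha := h a (List.mem_cons_self ..)
    simp only [List.map_cons, List.filter_cons, ha]
    cases hPa : P a <;>
      simp [ih (fun w hw => h w (List.mem_cons_of_mem _ hw))]

lemma take_drop_bd (l : List Char) {w : Nat} (hw : w ≤ l.length) :
    (l.take w = l.drop (l.length - w)) ↔ Bd l l.length w := by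
  
  rw [bd_iff]
  have hlt : (l.take w).length = w := by simp [hw]
  have hld : (l.drop (l.length - w)).length = w := by simp; omega
  constructor
  · intro heq
    refine ⟨hw, fun i hi => ?_⟩
    have h1 : l.length - w + i < l.length := by omega
    have h2 : i < l.length := by omega
    rw [List.getD_eq_getElem l ' ' h1, List.getD_eq_getElem l ' ' h2]
    have hq := congrArg (fun xs : List Char => xs.getD i ' ') heq
    simp only at hq
    rw [List.getD_eq_getElem _ ' ' (by omega : i < (l.take w).length),
        List.getD_eq_getElem _ ' ' (by omega : i < (l.drop (l.length - w)).length)] at hq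
    rw [List.getElem_take, List.getElem_drop] at hq
    exact hq.symm
  · rintro ⟨-, hpt⟩
    refine List.ext_getElem (by omega) (fun i hi1 hi2 => ?_)
    have hiw : i < w := by omega
    have h1 : l.length - w + i < l.length := by omega
    have h2 : i < l.length := by omega
    have := hpt i hiw
    rw [List.getD_eq_getElem l ' ' h1, List.getD_eq_getElem l ' ' h2] at this
    calc (l.take w)[i] = l[i]'h2 := List.getElem_take
      _ = l[l.length - w + i]'h1 := this.symm
      _ = (l.drop (l.length - w))[i]'(by omega) := List.getElem_drop.symm

lemma main_eq (l : List Char) :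
    chainLoop (kmpLoop l (3 * l.length) 1 0 (List.replicate l.length 0)) (l.length + 1) l.length
      = (PySem.List.pyRange (l.length : Int) 0 (-1)).filter
          (fun k => PySem.List.slice l none (some k) ==
            PySem.List.slice l (some ((l.length : Int) - k)) none) := by
  rcases Nat.eq_zero_or_pos l.length with hm | hm
  · rw [hm]
    rw [PySem.List.pyRange_neg_one_eq_nil (by simp)]
    simp [chainLoop]
  · have hpi := kmp_correct l hm
    have hpt : ∀ w ∈ desc l.length,
        (fun k : Int => PySem.List.slice l none (some k) ==
          PySem.List.slice l (some ((l.length : Int) - k)) none) (w : Int)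
          = bdB l l.length w := by
      intro w hw
      rw [mem_desc] at hw
      show (PySem.List.slice l none (some ((w : Nat) : Int)) ==
        PySem.List.slice l (some ((l.length : Int) - ((w : Nat) : Int))) none) = bdB l l.length w
      have h1 : PySem.List.slice l none (some ((w : Nat) : Int)) = l.take w :=
        PySem.List.slice_to_natCast l w
      have e : (l.length : Int) - ((w : Nat) : Int) = ((l.length - w : Nat) : Int) := by omega
      have h2 : PySem.List.slice l (some ((l.length : Int) - ((w : Nat) : Int))) none
          = l.drop (l.length - w) := by
        rw [e]; exact PySem.List.slice_from_natCast l (l.length - w)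
      rw [h1, h2, Bool.eq_iff_iff, beq_iff_eq]
      exact take_drop_bd l hw.2
    rw [chain_eq l _ hpi (l.length + 1) l.length (by omega) le_rfl (bd_refl l l.length),
        pyRange_desc l.length, filter_map_cast _ _ (desc l.length) hpt]

-- ===== VERDICT (by name: the statement is the Claim_ definition above) =====
theorem getPrefixSuffix_spec : Claim_equal_getPrefixSuffix := by
  intro s _
  show getPrefixSuffix s = getPrefixSuffix_alt s
  have hA : getPrefixSuffix s
      = chainLoop (kmpLoop s.toList (3 * s.toList.length) 1 0
          (List.replicate s.toList.length 0)) (s.toList.length + 1) s.toList.length := rfl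
  have hB : getPrefixSuffix_alt s
      = (PySem.List.pyRange (s.toList.length : Int) 0 (-1)).filter
          (fun k => PySem.List.slice s.toList none (some k) ==
            PySem.List.slice s.toList (some ((s.toList.length : Int) - k)) none) := rfl
  rw [hA, hB]
  exact main_eq s.toList
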